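-- pv_equiv track=rewrite | github.com/yamana819/COM1001 | Examples-1/ex37.py | occuringVowels
-- ===== SOURCE A (Python) =====
-- def occuringVowels(word):
--     word=word.upper()
--     vowels=['A','F','Y']
--     includedVowels=[]
--     for vowel in vowels:
--         if (vowel in word) and (vowel not in includedVowels):
--             includedVowels.append(vowel)
--     return includedVowels
-- ===== SOURCE B (Python) =====
-- def occuringVowels(word):
--     seen = set()
--     for ch in word.upper():
--         if ch in ('A', 'F', 'Y'):
--             seen.add(ch)
--     return [v for v in ['A', 'F', 'Y'] if v in seen]
-- ===== Notes on version B (the rewrite author's own statement) =====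
-- stated objective: alternative
-- what changed: B makes one pass over the uppercased word collecting the interesting letters into a set, then filters the fixed ['A','F','Y'] list against it, instead of A's three separate substring scans of the word.
import Mathlib
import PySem

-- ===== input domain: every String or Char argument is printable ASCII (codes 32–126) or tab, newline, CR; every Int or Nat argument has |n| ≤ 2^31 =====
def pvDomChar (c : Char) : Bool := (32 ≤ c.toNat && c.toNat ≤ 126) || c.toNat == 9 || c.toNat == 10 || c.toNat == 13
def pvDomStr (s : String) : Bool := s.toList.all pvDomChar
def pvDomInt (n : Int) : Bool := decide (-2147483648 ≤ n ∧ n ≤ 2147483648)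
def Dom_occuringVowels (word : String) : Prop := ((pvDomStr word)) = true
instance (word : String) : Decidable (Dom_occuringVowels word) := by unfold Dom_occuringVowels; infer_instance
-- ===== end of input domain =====

-- B replaces A's three substring scans of the word by one pass that collects the
-- interesting letters into a set, then filters the fixed list against it (alternative).

-- ===== PORT A =====
def occuringVowels (word : String) : List String :=
  let w := PySem.Str.upper word
  let vowels : List String := ["A", "F", "Y"]
  vowels.foldl
    (fun includedVowels vowel =>
      if PySem.Str.isIn vowel w && !(includedVowels.contains vowel) then
        includedVowels ++ [vowel]
      else includedVowels)
    []

-- ===== PORT B =====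
def occuringVowels_alt (word : String) : List String :=
  let seen : PySem.Set Char :=
    (PySem.Str.upper word).toList.foldl
      (fun seen ch =>
        if ch = 'A' ∨ ch = 'F' ∨ ch = 'Y' then PySem.Set.add seen ch else seen)
      PySem.Set.empty
  ((['A', 'F', 'Y'] : List Char).filter (fun v => PySem.Set.contains seen v)).map
    (fun c => String.ofList [c])

-- ===== PRECONDITION & SPEC =====
def Spec_occuringVowels (word : String) (out : List String) : Prop := out = occuringVowels_alt word
instance (word : String) (out : List String) : Decidable (Spec_occuringVowels word out) := by unfold Spec_occuringVowels; infer_instance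

-- ===== CLAIM (what is proved, stated in full; the proofs are below) =====
def Claim_equal_occuringVowels : Prop := ∀ (word : String), Dom_occuringVowels word → Spec_occuringVowels word (occuringVowels word)

-- ===== LEMMAS AND PROOFS =====

-- single-character substring containment is list membership
theorem singleton_infix_iff_mem (a : Char) (l : List Char) : [a] <:+: l ↔ a ∈ l := by
  constructor
  · intro h; exact h.subset (by simp)
  · intro h; obtain ⟨p, q, rfl⟩ := List.append_of_mem h; exact ⟨p, q, by simp⟩

theorem chars_isIn_single (c : Char) (l : List Char) : PySem.Chars.isIn [c] l = decide (c ∈ l) := by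
  by_cases h : c ∈ l
  · simp only [h, decide_true]
    exact (PySem.Chars.isIn_iff_infix [c] l).2 ((singleton_infix_iff_mem c l).2 h)
  · simp only [h, decide_false]
    exact (PySem.Chars.isIn_eq_false_iff [c] l).2 (fun hi => h ((singleton_infix_iff_mem c l).1 hi))

-- membership in B's `seen` after the fold
theorem mem_seen_fold (l : List Char) (s : PySem.Set Char) (c : Char) :
    c ∈ l.foldl
        (fun seen ch =>
          if ch = 'A' ∨ ch = 'F' ∨ ch = 'Y' then PySem.Set.add seen ch else seen) s
      ↔ c ∈ s ∨ (c ∈ l ∧ (c = 'A' ∨ c = 'F' ∨ c = 'Y')) := by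
  induction l generalizing s with
  | nil => simp
  | cons h t ih =>
    simp only [List.foldl_cons]
    by_cases hv : h = 'A' ∨ h = 'F' ∨ h = 'Y'
    · rw [if_pos hv, ih, PySem.Set.mem_add]
      constructor
      · rintro ((hs | rfl) | ⟨ht, hc⟩)
        · exact Or.inl hs
        · exact Or.inr ⟨List.mem_cons_self, hv⟩
        · exact Or.inr ⟨List.mem_cons_of_mem _ ht, hc⟩
      · rintro (hs | ⟨hm, hc⟩)
        · exact Or.inl (Or.inl hs)
        · rcases List.mem_cons.mp hm with rfl | ht
          · exact Or.inl (Or.inr rfl)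
          · exact Or.inr ⟨ht, hc⟩
    · rw [if_neg hv, ih]
      constructor
      · rintro (hs | ⟨ht, hc⟩)
        · exact Or.inl hs
        · exact Or.inr ⟨List.mem_cons_of_mem _ ht, hc⟩
      · rintro (hs | ⟨hm, hc⟩)
        · exact Or.inl hs
        · rcases List.mem_cons.mp hm with rfl | ht
          · exact absurd hc hv
          · exact Or.inr ⟨ht, hc⟩

theorem occuringVowels_eq (word : String) :
    occuringVowels word =
      (if 'A' ∈ (PySem.Str.upper word).toList then ["A"] else []) ++
      (if 'F' ∈ (PySem.Str.upper word).toList then ["F"] else []) ++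
      (if 'Y' ∈ (PySem.Str.upper word).toList then ["Y"] else []) := by
  simp only [occuringVowels, List.foldl_cons, List.foldl_nil]
  by_cases a : 'A' ∈ (PySem.Str.upper word).toList <;>
    by_cases f : 'F' ∈ (PySem.Str.upper word).toList <;>
      by_cases y : 'Y' ∈ (PySem.Str.upper word).toList <;>
        simp_all [chars_isIn_single]

theorem occuringVowels_alt_eq (word : String) :
    occuringVowels_alt word =
      (if 'A' ∈ (PySem.Str.upper word).toList then ["A"] else []) ++
      (if 'F' ∈ (PySem.Str.upper word).toList then ["F"] else []) ++
      (if 'Y' ∈ (PySem.Str.upper word).toList then ["Y"] else []) := by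
  have h : ∀ c : Char,
      (PySem.Set.contains
        ((PySem.Str.upper word).toList.foldl
          (fun seen ch =>
            if ch = 'A' ∨ ch = 'F' ∨ ch = 'Y' then PySem.Set.add seen ch else seen)
          PySem.Set.empty) c) =
      decide (c ∈ (PySem.Str.upper word).toList ∧ (c = 'A' ∨ c = 'F' ∨ c = 'Y')) := by
    intro c
    simp only [PySem.Set.contains, List.contains_eq_mem, decide_eq_decide]
    rw [mem_seen_fold]
    simp [PySem.Set.empty]
  simp only [occuringVowels_alt, List.filter, h]
  by_cases a : 'A' ∈ (PySem.Str.upper word).toList <;>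
    by_cases f : 'F' ∈ (PySem.Str.upper word).toList <;>
      by_cases y : 'Y' ∈ (PySem.Str.upper word).toList <;>
        simp_all

-- ===== VERDICT (by name: the statement is the Claim_ definition above) =====
theorem occuringVowels_spec : Claim_equal_occuringVowels := by
  intro word _
  unfold Spec_occuringVowels
  rw [occuringVowels_eq, occuringVowels_alt_eq]
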